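-- pv_equiv track=rewrite | github.com/Fran-cois/encode_heart | heart_codec/encoder.py | text_to_bits
-- ===== SOURCE A (Python) =====
-- def text_to_bits(text: str) -> list[int]:
--     """Convert a text string to a list of bits with an 8-bit length prefix."""
--     data = text.encode("utf-8")
--     length = len(data)
--     if length > 255:
--         raise ValueError("Secret must be ≤ 255 bytes (UTF-8 encoded)")
--
--     bits: list[int] = []
--     # 8-bit length prefix
--     for i in range(7, -1, -1):
--         bits.append((length >> i) & 1)
--     # payload
--     for byte in data:
--         for i in range(7, -1, -1):
--             bits.append((byte >> i) & 1)
--     return bits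
-- ===== SOURCE B (Python) =====
-- def text_to_bits(text: str) -> list[int]:
--     """Convert a text string to a list of bits with an 8-bit length prefix."""
--     data = text.encode("utf-8")
--     length = len(data)
--     if length > 255:
--         raise ValueError("Secret must be ≤ 255 bytes (UTF-8 encoded)")
--     combined = bytes([length]) + data
--     n = int.from_bytes(combined, "big")
--     total = 8 * len(combined)
--     return [(n >> i) & 1 for i in range(total - 1, -1, -1)]
-- ===== Notes on version B (the rewrite author's own statement) =====
-- stated objective: simpler
-- what changed: Replaces A's two nested shift/mask loops (prefix loop plus per-byte inner loop) by packing the whole prefixed byte string into one big integer with int.from_bytes and extracting all bits MSB-first in a single flat comprehension.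
import Mathlib
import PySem

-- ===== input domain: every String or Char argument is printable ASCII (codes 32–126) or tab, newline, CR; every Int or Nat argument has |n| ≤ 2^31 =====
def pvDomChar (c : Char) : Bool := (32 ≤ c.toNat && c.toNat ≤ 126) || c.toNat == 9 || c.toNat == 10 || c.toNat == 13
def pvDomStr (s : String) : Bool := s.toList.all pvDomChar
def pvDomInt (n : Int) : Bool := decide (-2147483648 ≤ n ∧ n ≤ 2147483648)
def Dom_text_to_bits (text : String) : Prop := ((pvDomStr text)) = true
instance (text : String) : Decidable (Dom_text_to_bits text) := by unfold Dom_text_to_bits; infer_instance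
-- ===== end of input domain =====

-- B packs the length-prefixed byte string into one big integer and extracts all bits
-- MSB-first in a single flat pass, replacing A's two nested shift/mask loops (objective: simpler).

-- ===== PORT A =====
-- text.encode("utf-8") as a byte list; exact on the ASCII domain Dom_text_to_bits, where
-- every character is a single byte equal to its code point.
def text_to_bits (text : String) : List Int :=
  let data : List Int := text.toList.map (fun c => (c.toNat : Int))
  let length : Int := data.length
  -- 'if length > 255: raise ValueError(...)' — those inputs are excluded by Pre_text_to_bits
  let bits : List Int :=
    (PySem.List.pyRange 7 (-1) (-1)).map (fun i => PySem.Int.band (length >>> i.toNat) 1)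
  data.foldl
    (fun bits byte =>
      bits ++ (PySem.List.pyRange 7 (-1) (-1)).map (fun i => PySem.Int.band (byte >>> i.toNat) 1))
    bits

-- ===== PORT B =====
-- int.from_bytes(combined, "big") ported as the big-endian fold it denotes.
def text_to_bits_alt (text : String) : List Int :=
  let data : List Int := text.toList.map (fun c => (c.toNat : Int))
  let length : Int := data.length
  -- same 'if length > 255: raise ValueError(...)' — excluded by Pre_text_to_bits
  let combined : List Int := length :: data
  let n : Int := combined.foldl (fun acc b => acc * 256 + b) 0
  let total : Int := 8 * combined.length
  (PySem.List.pyRange (total - 1) (-1) (-1)).map (fun i => PySem.Int.band (n >>> i.toNat) 1)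

-- ===== PRECONDITION & SPEC =====
-- A raises ValueError when the UTF-8 payload exceeds 255 bytes; on the ASCII domain that
-- is exactly strings of more than 255 characters (B raises there too).
def Pre_text_to_bits (text : String) : Prop := text.toList.length ≤ 255
instance (text : String) : Decidable (Pre_text_to_bits text) := by
  unfold Pre_text_to_bits; infer_instance
def pvWitness_text_to_bits : String := "hi"
def Spec_text_to_bits (text : String) (out : List Int) : Prop := out = text_to_bits_alt text
instance (text : String) (out : List Int) : Decidable (Spec_text_to_bits text out) := by
  unfold Spec_text_to_bits; infer_instance

-- ===== CLAIM (what is proved, stated in full; the proofs are below) =====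
def Claim_equal_text_to_bits : Prop :=
  ∀ (text : String), Dom_text_to_bits text → Pre_text_to_bits text →
    Spec_text_to_bits text (text_to_bits text)

-- ===== LEMMAS AND PROOFS =====

-- bits k-1 … 0 of N, MSB first, as 0/1 integers
def natBits (N : Nat) (k : Nat) : List Int :=
  (List.range k).map (fun j => (((N >>> (k - 1 - j)) &&& 1 : Nat) : Int))

theorem bandbit (m k : Nat) :
    PySem.Int.band ((m : Int) >>> ((k : Int))) 1 = (((m >>> k) &&& 1 : Nat) : Int) := by
  rw [Int.shiftRight_natCast_right, ← Int.natCast_shiftRight]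
  exact_mod_cast PySem.Int.band_natCast (m >>> k) 1

theorem pyRange_desc (k : Nat) :
    PySem.List.pyRange ((k : Int) - 1) (-1) (-1)
      = (List.range k).map (fun j : Nat => ((k : Int) - 1 - (j : Int))) := by
  unfold PySem.List.pyRange
  simp only [if_neg (by norm_num : ¬ ((-1 : Int) = 0))]
  have h1 : ¬ ((0:Int) < -1) := by norm_num
  rcases Nat.eq_zero_or_pos k with hk | hk
  · subst hk; norm_num
  · have h2 : (-1 : Int) < (k : Int) - 1 := by omega
    rw [if_neg h1, if_pos h2]
    have hc : ((((k : Int) - 1) - (-1) + -(-1) - 1) / -(-1)).toNat = k := by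
      norm_num
    rw [hc]
    apply List.map_congr_left
    intro j _
    ring

theorem foldl_byte_cast (ns : List Nat) (a : Nat) :
    (ns.map (fun b : Nat => (b : Int))).foldl (fun acc b => acc * 256 + b) (a : Int)
      = ((ns.foldl (fun acc b => acc * 256 + b) a : Nat) : Int) := by
  induction ns generalizing a with
  | nil => rfl
  | cons b ns ih =>
      simp only [List.map_cons, List.foldl_cons]
      have h : ((a : Int) * 256 + (b : Int)) = ((a * 256 + b : Nat) : Int) := by
        push_cast; ring
      rw [h, ih]

theorem foldl_split (ns : List Nat) (a : Nat) :
    ns.foldl (fun acc b => acc * 256 + b) a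
      = a * 2 ^ (8 * ns.length) + ns.foldl (fun acc b => acc * 256 + b) 0 := by
  induction ns generalizing a with
  | nil => simp
  | cons b ns ih =>
      simp only [List.foldl_cons, List.length_cons]
      simp only [Nat.zero_mul, Nat.zero_add]
      rw [ih (a * 256 + b), ih b]
      have hp : 2 ^ (8 * (ns.length + 1)) = 2 ^ (8 * ns.length) * 256 := by
        rw [Nat.mul_add, pow_add]; norm_num
      rw [hp]; ring

theorem foldl_bound (ns : List Nat) (h : ∀ b ∈ ns, b < 256) :
    ns.foldl (fun acc b => acc * 256 + b) 0 < 2 ^ (8 * ns.length) := by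
  induction ns with
  | nil => simp
  | cons b ns ih =>
      simp only [List.foldl_cons, List.length_cons, Nat.zero_mul, Nat.zero_add]
      rw [foldl_split ns b]
      have hb : b < 256 := h b (List.mem_cons_self ..)
      have hv : ns.foldl (fun acc x => acc * 256 + x) 0 < 2 ^ (8 * ns.length) :=
        ih (fun x hx => h x (List.mem_cons_of_mem _ hx))
      have hp : 2 ^ (8 * (ns.length + 1)) = 256 * 2 ^ (8 * ns.length) := by
        rw [Nat.mul_add, pow_add]; ring
      rw [hp]
      nlinarith

theorem hi_bit (a b L k v : Nat) (_hb : b < 256) (hk : k < 8) (hv : v < 2 ^ (8 * L)) :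
    ((((a * 256 + b) * 2 ^ (8 * L) + v) >>> (8 * L + k)) &&& 1) = ((b >>> k) &&& 1) := by
  rw [Nat.shiftRight_eq_div_pow, Nat.shiftRight_eq_div_pow,
      Nat.and_one_is_mod, Nat.and_one_is_mod]
  have h1 : ((a * 256 + b) * 2 ^ (8 * L) + v) / 2 ^ (8 * L + k)
      = (a * 256 + b) / 2 ^ k := by
    rw [pow_add, ← Nat.div_div_eq_div_mul]
    congr 1
    rw [Nat.add_comm, Nat.mul_comm,
        Nat.add_mul_div_left v (a * 256 + b) (by positivity),
        Nat.div_eq_of_lt hv, Nat.zero_add]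
  rw [h1]
  interval_cases k <;> omega

theorem natBits_split (N p q : Nat) :
    natBits N (p + q)
      = (List.range p).map (fun j => (((N >>> (p + q - 1 - j)) &&& 1 : Nat) : Int))
        ++ natBits N q := by
  unfold natBits
  rw [List.range_add, List.map_append, List.map_map]
  congr 1
  apply List.map_congr_left
  intro j _
  simp only [Function.comp_apply]
  have he : p + q - 1 - (p + j) = q - 1 - j := by omega
  rw [he]

theorem main_bits (ns : List Nat) (a : Nat) (h : ∀ b ∈ ns, b < 256) :
    natBits (ns.foldl (fun acc b => acc * 256 + b) a) (8 * ns.length)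
      = ns.flatMap (fun b => natBits b 8) := by
  induction ns generalizing a with
  | nil => simp [natBits]
  | cons b ns ih =>
      simp only [List.foldl_cons, List.length_cons, List.flatMap_cons]
      have hlen : 8 * (ns.length + 1) = 8 + 8 * ns.length := by omega
      rw [hlen, natBits_split]
      have hrest := ih (a * 256 + b) (fun x hx => h x (List.mem_cons_of_mem _ hx))
      rw [hrest]
      congr 1
      -- high 8 bits are the bits of b
      have hb : b < 256 := h b (List.mem_cons_self ..)
      have hN : ns.foldl (fun acc x => acc * 256 + x) (a * 256 + b)
          = (a * 256 + b) * 2 ^ (8 * ns.length)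
            + ns.foldl (fun acc x => acc * 256 + x) 0 :=
        foldl_split ns (a * 256 + b)
      have hv : ns.foldl (fun acc x => acc * 256 + x) 0 < 2 ^ (8 * ns.length) :=
        foldl_bound ns (fun x hx => h x (List.mem_cons_of_mem _ hx))
      unfold natBits
      apply List.map_congr_left
      intro j hj
      have hj8 : j < 8 := List.mem_range.mp hj
      have hidx : 8 + 8 * ns.length - 1 - j = 8 * ns.length + (7 - j) := by omega
      have hidx2 : 8 - 1 - j = 7 - j := by omega
      rw [hidx, hidx2, hN, hi_bit a b ns.length (7 - j) _ hb (by omega) hv]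

-- A's per-byte inner loop produces exactly natBits
theorem byte_loop (m : Nat) :
    (PySem.List.pyRange 7 (-1) (-1)).map
        (fun i => PySem.Int.band ((m : Int) >>> i.toNat) 1)
      = natBits m 8 := by
  have h : PySem.List.pyRange 7 (-1) (-1) = [7, 6, 5, 4, 3, 2, 1, 0] := by decide
  rw [h]
  simp only [natBits, List.range_succ, List.range_zero, List.map_cons,
    List.map_nil, List.nil_append, List.cons_append, List.cons.injEq, and_true]
  exact ⟨bandbit m 7, bandbit m 6, bandbit m 5, bandbit m 4, bandbit m 3,
    bandbit m 2, bandbit m 1, bandbit m 0⟩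

theorem chars_lt (text : String) (hD : Dom_text_to_bits text) :
    ∀ b ∈ text.toList.map Char.toNat, b < 256 := by
  intro b hb
  rcases List.mem_map.mp hb with ⟨c, hc, rfl⟩
  have := List.all_eq_true.mp hD c hc
  simp only [pvDomChar, Bool.or_eq_true, Bool.and_eq_true, decide_eq_true_eq,
    beq_iff_eq] at this
  omega

-- B's flat pass produces exactly natBits
theorem B_bits (N k : Nat) :
    (PySem.List.pyRange ((k : Int) - 1) (-1) (-1)).map
        (fun i => PySem.Int.band ((N : Int) >>> i.toNat) 1)
      = natBits N k := by
  rw [pyRange_desc, List.map_map]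
  unfold natBits
  apply List.map_congr_left
  intro j hj
  have hj' : j < k := List.mem_range.mp hj
  simp only [Function.comp_apply]
  have ht : ((k : Int) - 1 - (j : Int)).toNat = k - 1 - j := by omega
  rw [ht]
  exact bandbit N (k - 1 - j)

-- ===== VERDICT (by name: the statement is the Claim_ definition above) =====
theorem text_to_bits_spec : Claim_equal_text_to_bits := by
  intro text hD hP
  unfold Spec_text_to_bits text_to_bits text_to_bits_alt
  set cs := text.toList with hcs
  set ns : List Nat := cs.map Char.toNat with hns
  have hdata : cs.map (fun c => ((c.toNat : Nat) : Int)) = ns.map (fun b : Nat => (b : Int)) := by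
    rw [hns, List.map_map]; rfl
  have hbytes : ∀ b ∈ ns, b < 256 := chars_lt text hD
  have hM : ns.length ≤ 255 := by rw [hns, List.length_map]; exact hP
  simp only [hdata, List.length_map]
  -- A side: prefix loop + per-byte loops = natBits of the prefixed byte list
  rw [PySem.List.foldl_append_eq_flatMap]
  have hAflat : (ns.map (fun b : Nat => (b : Int))).flatMap
      (fun byte => (PySem.List.pyRange 7 (-1) (-1)).map
        (fun i => PySem.Int.band (byte >>> i.toNat) 1))
      = ns.flatMap (fun b => natBits b 8) := by
    rw [List.flatMap_map]
    exact List.flatMap_congr (fun b _ => byte_loop b)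
  rw [hAflat, byte_loop ns.length]
  -- B side: the flat pass = natBits of the packed integer
  have hcomb : ((ns.length : Int)) :: ns.map (fun b : Nat => (b : Int))
      = (ns.length :: ns).map (fun b : Nat => (b : Int)) := by
    rw [List.map_cons]
  have hfold : ((ns.length :: ns).map (fun b : Nat => (b : Int))).foldl
        (fun acc b => acc * 256 + b) 0
      = (((ns.length :: ns).foldl (fun acc b => acc * 256 + b) 0 : Nat) : Int) := by
    rw [show (0 : Int) = ((0 : Nat) : Int) from rfl]
    exact foldl_byte_cast (ns.length :: ns) 0
  have htot : (8 * ((((ns.length : Int)) :: ns.map (fun b : Nat => (b : Int))).length : Int)) - 1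
      = ((8 * (ns.length + 1) : Nat) : Int) - 1 := by
    simp only [List.length_cons, List.length_map]
    push_cast
    ring
  rw [htot, hcomb, hfold, B_bits]
  -- pack/unpack round trip
  have hmain := main_bits (ns.length :: ns) 0
    (by
      intro b hb
      rcases List.mem_cons.mp hb with hb | hb
      · omega
      · exact hbytes b hb)
  simp only [List.length_cons, List.flatMap_cons, Nat.zero_mul, Nat.zero_add,
    List.foldl_cons] at hmain
  simp only [List.foldl_cons, Nat.zero_mul, Nat.zero_add]
  exact hmain.symm
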